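-- pv_equiv track=rewrite | github.com/alexandrubuzea/Diploma-project | gen_data/data_generation.py | to_one_hot
-- ===== SOURCE A (Python) =====
-- MAX_NODES = 100
--
-- def to_one_hot(n : int):
--     result = []
--
--     while n > 0:
--         result.append(n % 2)
--         n = int(n / 2)
--
--     l = len(result)
--
--     result += [0 for _ in range(MAX_NODES - l)]
--     return list(reversed(result))
-- ===== SOURCE B (Python) =====
-- MAX_NODES = 100
--
-- def to_one_hot(n: int):
--     bits = [int(c) for c in bin(n)[2:]] if n > 0 else []
--     return [0] * (MAX_NODES - len(bits)) + bits
-- ===== Notes on version B (the rewrite author's own statement) =====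
-- stated objective: idiomatic
-- what changed: Replaces the append-then-reverse digit loop with Python's built-in base conversion bin(n) plus a single left-pad, no reversal or per-digit arithmetic.
import Mathlib
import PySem

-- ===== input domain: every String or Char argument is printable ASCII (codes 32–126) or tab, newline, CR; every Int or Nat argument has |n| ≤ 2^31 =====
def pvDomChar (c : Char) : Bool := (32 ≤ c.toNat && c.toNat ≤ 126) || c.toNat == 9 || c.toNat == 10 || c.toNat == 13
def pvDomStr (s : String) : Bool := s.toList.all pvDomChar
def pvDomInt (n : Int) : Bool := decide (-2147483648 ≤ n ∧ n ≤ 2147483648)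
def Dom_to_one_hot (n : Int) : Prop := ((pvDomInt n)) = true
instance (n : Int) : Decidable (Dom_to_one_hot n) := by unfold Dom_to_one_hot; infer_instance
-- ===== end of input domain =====

-- B replaces A's append-then-reverse digit loop by direct big-endian base conversion (bin(n))
-- plus a single left-pad; same return value, similar cost (objective: idiomatic).

-- ===== PORT A =====
-- the while loop: append n % 2, n = int(n / 2)  (int(n/2) = n // 2 exactly, since |n| ≤ 2^31 < 2^53 keeps the float division exact)
def pvLoopA (n : Int) (result : List Int) : List Int :=
  if _h : n > 0 then
    pvLoopA (PySem.Int.floordiv n 2) (result ++ [PySem.Int.mod n 2])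
  else result
termination_by n.toNat
decreasing_by
  rw [PySem.Int.floordiv_eq_ediv_of_pos (by omega : (0:Int) < 2)]
  omega

def to_one_hot (n : Int) : List Int :=
  let result := pvLoopA n []
  let l : Int := result.length
  -- result += [0 for _ in range(MAX_NODES - l)]  (range of a negative bound is empty → toNat clamp is exact)
  let result := result ++ List.replicate (100 - l).toNat (0 : Int)
  result.reverse

-- ===== PORT B =====
-- bin(m)[2:] for m > 0: the big-endian binary digit characters (empty for m = 0)
def pvBinDigits (m : Nat) : List Char :=
  if m = 0 then [] else pvBinDigits (m / 2) ++ [if m % 2 = 1 then '1' else '0']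
termination_by m
decreasing_by omega

def to_one_hot_alt (n : Int) : List Int :=
  let bits := if n > 0 then (pvBinDigits n.toNat).map (fun c => ((c.toNat : Int) - 48)) else []
  List.replicate ((100 : Int) - bits.length).toNat 0 ++ bits

-- ===== PRECONDITION & SPEC =====
def Spec_to_one_hot (n : Int) (out : List Int) : Prop := out = to_one_hot_alt n
instance (n : Int) (out : List Int) : Decidable (Spec_to_one_hot n out) := by unfold Spec_to_one_hot; infer_instance

-- ===== CLAIM (what is proved, stated in full; the proofs are below) =====
def Claim_equal_to_one_hot : Prop := ∀ (n : Int), Dom_to_one_hot n → Spec_to_one_hot n (to_one_hot n)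

-- ===== LEMMAS AND PROOFS =====

lemma pvLoopA_append (n : Int) (acc : List Int) : pvLoopA n acc = acc ++ pvLoopA n [] := by
  induction hm : n.toNat using Nat.strong_induction_on generalizing n acc with
  | _ m ih =>
    conv_lhs => rw [pvLoopA]
    conv_rhs => rw [pvLoopA]
    by_cases h : n > 0
    · simp only [h, dif_pos]
      have h2 : PySem.Int.floordiv n 2 = n / 2 :=
        PySem.Int.floordiv_eq_ediv_of_pos (by omega)
      have hlt : (PySem.Int.floordiv n 2).toNat < m := by rw [h2]; omega
      rw [ih _ hlt _ _ rfl, ih _ hlt _ ([] ++ [PySem.Int.mod n 2]) rfl]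
      simp
    · simp [h]

lemma rev_loop (m : Nat) (n : Int) (hm : n.toNat = m) :
    (pvLoopA n []).reverse
      = (pvBinDigits n.toNat).map (fun c => ((c.toNat : Int) - 48)) := by
  induction m using Nat.strong_induction_on generalizing n with
  | _ m ih =>
    rw [pvLoopA]
    by_cases h : n > 0
    · simp only [h, dif_pos]
      have h2 : PySem.Int.floordiv n 2 = n / 2 :=
        PySem.Int.floordiv_eq_ediv_of_pos (by omega)
      have h3 : PySem.Int.mod n 2 = n % 2 :=
        PySem.Int.mod_eq_emod_of_pos (by omega)
      rw [pvLoopA_append, pvBinDigits]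
      have hnz : n.toNat ≠ 0 := by omega
      simp only [hnz, List.reverse_append]
      rw [h2, ih (n / 2).toNat (by omega) _ rfl]
      have hdiv : (n / 2).toNat = n.toNat / 2 := by omega
      rw [hdiv, h3]
      by_cases hp : n.toNat % 2 = 1 <;> simp [hp] <;> omega
    · have : n.toNat = 0 := by omega
      rw [this, pvBinDigits]
      simp [h]

-- ===== VERDICT (by name: the statement is the Claim_ definition above) =====
theorem to_one_hot_spec : Claim_equal_to_one_hot := by
  intro n _
  unfold Spec_to_one_hot to_one_hot to_one_hot_alt
  simp only []
  by_cases h : n > 0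
  · have hrev := rev_loop n.toNat n rfl
    simp only [h, if_pos]
    rw [List.reverse_append, List.reverse_replicate, hrev]
    congr 2
    rw [← hrev]
    simp
  · have h0 : pvLoopA n [] = [] := by rw [pvLoopA]; simp [h]
    simp [h, h0]
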